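-- pv_equiv track=rewrite | github.com/lecasax/simulador_probabilidade | simulacao_streamlit.py | cria_rodadas_de_remocao
-- ===== SOURCE A (Python) =====
-- def cria_rodadas_de_remocao(cont_por_sorteio, cont_por_lance, tamanho_do_grupo):
--     rodadas_removidas = []
--     count_k = 0
--     while count_k <= tamanho_do_grupo:
--         for k in range(cont_por_sorteio):
--             count_k += 1
--         for j in range(cont_por_lance):
--             count_k += 1
--             if count_k <= tamanho_do_grupo:
--                 rodadas_removidas.append(count_k)
--     return rodadas_removidas
-- ===== SOURCE B (Python) =====
-- def cria_rodadas_de_remocao(cont_por_sorteio, cont_por_lance, tamanho_do_grupo):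
--     s = max(cont_por_sorteio, 0)
--     l = max(cont_por_lance, 0)
--     step = s + l
--     out = []
--     base = 0
--     while base <= tamanho_do_grupo:
--         out.extend(range(base + s + 1, min(base + s + l, tamanho_do_grupo) + 1))
--         base += step
--     return out
-- ===== Notes on version B (the rewrite author's own statement) =====
-- stated objective: faster
-- what changed: Instead of incrementing count_k one step at a time through two inner per-unit loops, B advances the round base arithmetically by step = max(cs,0)+max(cl,0) and emits each round's removals as one bounded range(base+s+1, min(base+s+l, tamanho)+1), skipping the per-sorteio counting loop entirely.
import Mathlib
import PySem

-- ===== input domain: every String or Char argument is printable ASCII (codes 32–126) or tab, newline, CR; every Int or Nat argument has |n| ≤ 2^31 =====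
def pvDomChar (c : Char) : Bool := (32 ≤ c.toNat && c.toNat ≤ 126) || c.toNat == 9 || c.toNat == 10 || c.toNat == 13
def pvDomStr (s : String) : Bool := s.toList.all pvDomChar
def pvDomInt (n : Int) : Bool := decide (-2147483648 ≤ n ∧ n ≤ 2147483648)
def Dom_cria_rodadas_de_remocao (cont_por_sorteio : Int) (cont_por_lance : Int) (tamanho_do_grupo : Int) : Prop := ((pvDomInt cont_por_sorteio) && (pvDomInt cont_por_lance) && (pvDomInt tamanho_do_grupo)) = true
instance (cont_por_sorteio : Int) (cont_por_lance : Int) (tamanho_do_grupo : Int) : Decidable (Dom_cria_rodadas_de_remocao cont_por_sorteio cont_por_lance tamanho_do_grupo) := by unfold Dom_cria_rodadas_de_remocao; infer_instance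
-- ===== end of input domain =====

-- B replaces A's per-unit incrementing loops by per-round arithmetic: it jumps the round base by
-- step = max(cs,0)+max(cl,0) and emits each round's appended indices as one bounded range (objective: faster).

-- ===== PORT A =====
-- while-loop of A, driven by a fuel parameter as a totality guard only: each executed round raises
-- count_k by at least 1 whenever Python A terminates, so the fuel (t+1).toNat + 1 passed by the
-- wrapper is never exhausted whenever Python A terminates (where it would be, Python A loops forever).
def criaLoopA (cs cl t : Int) : Nat → Int → List Int → List Int
  | 0, _, acc => acc
  | fuel + 1, ck, acc =>
    if ck ≤ t then
      let st := (PySem.List.pyRange 0 cl 1).foldl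
          (fun (p : Int × List Int) _ =>
            (p.1 + 1, if p.1 + 1 ≤ t then p.2 ++ [p.1 + 1] else p.2))
          ((PySem.List.pyRange 0 cs 1).foldl (fun c _ => c + 1) ck, acc)
      criaLoopA cs cl t fuel st.1 st.2
    else acc

def cria_rodadas_de_remocao (cont_por_sorteio : Int) (cont_por_lance : Int) (tamanho_do_grupo : Int) : List Int :=
  criaLoopA cont_por_sorteio cont_por_lance tamanho_do_grupo ((tamanho_do_grupo + 1).toNat + 1) 0 []

-- ===== PORT B =====
-- while-loop of B, driven by the same kind of fuel totality guard (B's loop advances base by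
-- s + l ≥ 1 whenever Python B terminates; where the fuel would run out, Python B loops forever).
def criaLoopB (s l t : Int) : Nat → Int → List Int → List Int
  | 0, _, out => out
  | fuel + 1, base, out =>
    if base ≤ t then
      criaLoopB s l t fuel (base + (s + l))
        (out ++ PySem.List.pyRange (base + s + 1) (min (base + s + l) t + 1) 1)
    else out

def cria_rodadas_de_remocao_alt (cont_por_sorteio : Int) (cont_por_lance : Int) (tamanho_do_grupo : Int) : List Int :=
  criaLoopB (max cont_por_sorteio 0) (max cont_por_lance 0) tamanho_do_grupo ((tamanho_do_grupo + 1).toNat + 1) 0 []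

-- ===== PRECONDITION & SPEC =====
-- no Pre_: both ports are total; on inputs where both Pythons diverge (both counters ≤ 0 with
-- 0 ≤ tamanho) the fuel guard returns the state so far, and the equivalence still holds there.
def Spec_cria_rodadas_de_remocao (cont_por_sorteio : Int) (cont_por_lance : Int) (tamanho_do_grupo : Int) (out : List Int) : Prop := out = cria_rodadas_de_remocao_alt cont_por_sorteio cont_por_lance tamanho_do_grupo
instance (cont_por_sorteio : Int) (cont_por_lance : Int) (tamanho_do_grupo : Int) (out : List Int) : Decidable (Spec_cria_rodadas_de_remocao cont_por_sorteio cont_por_lance tamanho_do_grupo out) := by unfold Spec_cria_rodadas_de_remocao; infer_instance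

-- ===== CLAIM (what is proved, stated in full; the proofs are below) =====
def Claim_equal_cria_rodadas_de_remocao : Prop := ∀ (cont_por_sorteio : Int) (cont_por_lance : Int) (tamanho_do_grupo : Int), Dom_cria_rodadas_de_remocao cont_por_sorteio cont_por_lance tamanho_do_grupo → Spec_cria_rodadas_de_remocao cont_por_sorteio cont_por_lance tamanho_do_grupo (cria_rodadas_de_remocao cont_por_sorteio cont_por_lance tamanho_do_grupo)

-- ===== LEMMAS AND PROOFS =====

-- A's sorteio loop just adds its trip count to count_k
theorem pvFoldlCount {α : Type} (L : List α) (c : Int) :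
    L.foldl (fun c _ => c + 1) c = c + L.length := by
  induction L generalizing c with
  | nil => simp
  | cons a L ih => simp [List.foldl, ih]; ring

-- A's lance loop advances count_k by its trip count and appends exactly the range (c, min (c+len) t]
theorem pvFoldlPair {α : Type} (t : Int) (L : List α) (c : Int) (acc : List Int) :
    L.foldl (fun (p : Int × List Int) _ =>
        (p.1 + 1, if p.1 + 1 ≤ t then p.2 ++ [p.1 + 1] else p.2)) (c, acc)
      = (c + L.length, acc ++ PySem.List.pyRange (c + 1) (min (c + L.length) t + 1) 1) := by
  induction L generalizing c acc with
  | nil =>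
    simp only [List.foldl_nil, List.length_nil, Int.natCast_zero, add_zero]
    rw [PySem.List.pyRange_one_eq_nil (by omega)]
    simp
  | cons a L ih =>
    simp only [List.foldl_cons, ih]
    by_cases h : c + 1 ≤ t
    · simp only [if_pos h]
      rw [List.length_cons]
      push_cast
      rw [PySem.List.pyRange_one_cons (by omega : c + 1 < min (c + ((L.length:Int) + 1)) t + 1)]
      have hm : min (c + 1 + (L.length:Int)) t = min (c + ((L.length:Int) + 1)) t := by omega
      rw [hm]
      simp only [Prod.mk.injEq]
      exact ⟨by ring, by simp⟩
    · simp only [if_neg h]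
      have e1 : PySem.List.pyRange (c + 1 + 1) (min (c + 1 + (L.length:Int)) t + 1) 1 = [] :=
        PySem.List.pyRange_one_eq_nil (by omega)
      have e2 : PySem.List.pyRange (c + 1) (min (c + ((L.length:Int) + 1)) t + 1) 1 = [] :=
        PySem.List.pyRange_one_eq_nil (by omega)
      rw [List.length_cons]
      push_cast
      rw [e1, e2]
      simp only [Prod.mk.injEq]
      exact ⟨by ring, trivial⟩

-- the two loops transform the same state identically round by round
theorem loop_eq (cs cl t : Int) (fuel : Nat) :
    ∀ (ck : Int) (acc : List Int),
      criaLoopA cs cl t fuel ck acc = criaLoopB (max cs 0) (max cl 0) t fuel ck acc := by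
  induction fuel with
  | zero => intro ck acc; rfl
  | succ fuel ih =>
    intro ck acc
    rw [criaLoopA, criaLoopB]
    by_cases h : ck ≤ t
    · rw [if_pos h, if_pos h]
      simp only [pvFoldlPair, pvFoldlCount, PySem.List.length_pyRange_one]
      have hs : ((cs - 0).toNat : Int) = max cs 0 := by omega
      have hl : ((cl - 0).toNat : Int) = max cl 0 := by omega
      rw [hs, hl]
      have e1 : ck + max cs 0 + max cl 0 = ck + (max cs 0 + max cl 0) := by ring
      rw [e1]
      exact ih (ck + (max cs 0 + max cl 0)) _
    · rw [if_neg h, if_neg h]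

-- ===== VERDICT (by name: the statement is the Claim_ definition above) =====
theorem cria_rodadas_de_remocao_spec : Claim_equal_cria_rodadas_de_remocao := by
  intro cs cl t _
  unfold Spec_cria_rodadas_de_remocao cria_rodadas_de_remocao cria_rodadas_de_remocao_alt
  exact loop_eq cs cl t _ 0 []
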